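-- pv_equiv track=rewrite | github.com/debruijn/adventofcode | aoc_2015/aoc_15.py | find_dist_greedy
-- ===== SOURCE A (Python) =====
-- from math import prod
--
-- def get_score(ingredients, dist):
--     # Calculate score for part 1
--     return prod(max(sum(dist[j] * ingredients[j][x] for j in range(len(ingredients))), 0)
--                 for x in range(len(ingredients[0]) - 1))
--
-- def find_dist_greedy(ingredients, total=100):
--     # Greedy approach: initialize all with 1 (needed due to 0s in input), and then assign the next tablespoon to the
--     # one that improves the score the most, until all 100 are assigned.
--     curr = [1 for _ in ingredients]
--     while sum(curr) < total:
--         new = []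
--         for i in range(len(ingredients)):
--             try_dist = curr.copy()
--             try_dist[i] += 1
--             try_val = get_score(ingredients, try_dist)
--             new.append(try_val)
--         pick = max(range(len(ingredients)), key=lambda x: new[x])
--         curr[pick] += 1
--
--     return get_score(ingredients, curr)
-- ===== SOURCE B (Python) =====
-- from math import prod
--
-- def find_dist_greedy(ingredients, total=100):
--     # Incremental greedy: keep per-property sums; evaluating a candidate is O(P)
--     # instead of recomputing the full score from the distribution, O(I*P).
--     p = len(ingredients[0]) - 1
--     sums = [sum(row[x] for row in ingredients) for x in range(p)]
--     remaining = total - len(ingredients)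
--     while remaining > 0:
--         best_i = 0
--         best_v = None
--         for i in range(len(ingredients)):
--             row = ingredients[i]
--             v = 1
--             for x in range(p):
--                 v *= max(sums[x] + row[x], 0)
--             if best_v is None or v > best_v:
--                 best_i, best_v = i, v
--         best_row = ingredients[best_i]
--         for x in range(p):
--             sums[x] += best_row[x]
--         remaining -= 1
--     return prod(max(s, 0) for s in sums)
-- ===== Notes on version B (the rewrite author's own statement) =====
-- stated objective: faster
-- what changed: B maintains the per-property weighted sums incrementally and scores each candidate ingredient in O(P) from those sums, instead of A's recomputation of the full score from the whole distribution for every candidate each round.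
import Mathlib
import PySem

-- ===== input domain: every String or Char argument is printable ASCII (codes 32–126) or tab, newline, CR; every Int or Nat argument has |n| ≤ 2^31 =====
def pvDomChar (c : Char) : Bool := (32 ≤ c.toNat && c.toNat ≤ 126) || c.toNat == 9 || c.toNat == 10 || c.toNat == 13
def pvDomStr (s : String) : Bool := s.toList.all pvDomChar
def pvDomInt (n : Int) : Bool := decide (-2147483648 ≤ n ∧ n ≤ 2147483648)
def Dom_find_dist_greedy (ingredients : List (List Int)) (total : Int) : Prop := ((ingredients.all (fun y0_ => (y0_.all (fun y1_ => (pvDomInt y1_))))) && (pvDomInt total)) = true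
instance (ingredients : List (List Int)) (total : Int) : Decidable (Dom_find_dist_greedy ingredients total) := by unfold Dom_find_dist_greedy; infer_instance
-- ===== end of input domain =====

-- B replaces A's per-candidate full-score recomputation by incrementally
-- maintained per-property sums (objective: faster; same greedy choices/result).
-- Inside Pre_ every index used by either Python is in range, so List.getD is an
-- exact port of the Python indexing.

-- ===== PORT A =====
-- sum(dist[j] * ingredients[j][x] for j in range(len(ingredients)))
def pvSumAt (ingredients : List (List Int)) (dist : List Int) (x : Nat) : Int :=
  ((List.range ingredients.length).map
    (fun j => dist.getD j 0 * (ingredients.getD j []).getD x 0)).sum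

-- get_score: prod over x in range(len(ingredients[0]) - 1) of max(sum..., 0)
def pvGetScore (ingredients : List (List Int)) (dist : List Int) : Int :=
  ((List.range ((ingredients.headD []).length - 1)).map
    (fun x => max (pvSumAt ingredients dist x) 0)).prod

-- max(range(len(new)), key=lambda x: new[x]) : first index attaining the max
def pvPickMax (new : List Int) : Nat :=
  (List.range new.length).foldl
    (fun best x => if new.getD x 0 > new.getD best 0 then x else best) 0

-- the while-loop of A; fuel = number of remaining iterations (sum grows by 1
-- per iteration inside Pre_, so the guard is re-checked faithfully each round)
def pvLoopA (ingredients : List (List Int)) (total : Int) : Nat → List Int → List Int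
  | 0, curr => curr
  | fuel+1, curr =>
    if curr.sum < total then
      let new := (List.range ingredients.length).map
        (fun i => pvGetScore ingredients (curr.set i (curr.getD i 0 + 1)))
      let pick := pvPickMax new
      pvLoopA ingredients total fuel (curr.set pick (curr.getD pick 0 + 1))
    else curr

def find_dist_greedy (ingredients : List (List Int)) (total : Int) : Int :=
  let curr := ingredients.map (fun _ => (1 : Int))
  pvGetScore ingredients (pvLoopA ingredients total (total - curr.sum).toNat curr)

-- ===== PORT B =====
-- v = prod over x in range(p) of max(sums[x] + row[x], 0)
def pvCandScore (p : Nat) (sums row : List Int) : Int :=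
  ((List.range p).map (fun x => max (sums.getD x 0 + row.getD x 0) 0)).prod

-- the best_i/best_v scan of Source B (first strictly greater candidate wins)
def pvBestIndex (ingredients : List (List Int)) (p : Nat) (sums : List Int) : Nat :=
  ((List.range ingredients.length).foldl
    (fun st i =>
      let v := pvCandScore p sums (ingredients.getD i [])
      match st.2 with
      | none => (i, some v)
      | some bv => if v > bv then (i, some v) else st)
    ((0 : Nat), (none : Option Int))).1

-- the while-loop of Source B: `remaining` is the fuel, sums updated in place
def pvLoopB (ingredients : List (List Int)) (p : Nat) : Nat → List Int → List Int
  | 0, sums => sums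
  | fuel+1, sums =>
    let pick := pvBestIndex ingredients p sums
    let row := ingredients.getD pick []
    pvLoopB ingredients p fuel ((List.range p).map (fun x => sums.getD x 0 + row.getD x 0))

def find_dist_greedy_alt (ingredients : List (List Int)) (total : Int) : Int :=
  let p := (ingredients.headD []).length - 1
  let sums0 := (List.range p).map (fun x => (ingredients.map (fun row => row.getD x 0)).sum)
  let sums := pvLoopB ingredients p (total - (ingredients.length : Int)).toNat sums0
  (sums.map (fun s => max s 0)).prod

-- ===== PRECONDITION & SPEC =====
-- Pre_ excludes exactly the inputs where Python A raises: an empty ingredient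
-- list (IndexError on ingredients[0]) and rows shorter than
-- len(ingredients[0]) - 1 (IndexError on ingredients[j][x]).
def Pre_find_dist_greedy (ingredients : List (List Int)) (total : Int) : Prop :=
  ingredients ≠ [] ∧ ∀ r ∈ ingredients, (ingredients.headD []).length - 1 ≤ r.length

instance (ingredients : List (List Int)) (total : Int) : Decidable (Pre_find_dist_greedy ingredients total) := by
  unfold Pre_find_dist_greedy; infer_instance

def pvWitness_find_dist_greedy : List (List Int) × Int := ([[1, 2], [3, 4]], 5)

def Spec_find_dist_greedy (ingredients : List (List Int)) (total : Int) (out : Int) : Prop := out = find_dist_greedy_alt ingredients total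
instance (ingredients : List (List Int)) (total : Int) (out : Int) : Decidable (Spec_find_dist_greedy ingredients total out) := by unfold Spec_find_dist_greedy; infer_instance

-- ===== CLAIM (what is proved, stated in full; the proofs are below) =====
def Claim_equal_find_dist_greedy : Prop := ∀ (ingredients : List (List Int)) (total : Int), Dom_find_dist_greedy ingredients total → Pre_find_dist_greedy ingredients total → Spec_find_dist_greedy ingredients total (find_dist_greedy ingredients total)


-- ===== LEMMAS AND PROOFS =====

-- the per-property sums B maintains, expressed in A's terms
def pvSumsOf (ing : List (List Int)) (curr : List Int) : List Int :=
  (List.range ((ing.headD []).length - 1)).map (fun x => pvSumAt ing curr x)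

theorem pv_getD_range_map {α : Type} (f : Nat → α) (d : α) {n x : Nat} (hx : x < n) :
    (((List.range n).map f).getD x d) = f x := by
  simp [List.getD, hx]

theorem pv_map_range_getD {α β : Type} (F : α → β) (l : List α) (d : α) :
    (List.range l.length).map (fun j => F (l.getD j d)) = l.map F := by
  induction l with
  | nil => simp
  | cons a t ih =>
    simp only [List.length_cons, List.range_succ_eq_map, List.map_cons, List.map_map]
    simpa using ih

theorem pv_sum_set (l : List Int) (i : Nat) (hi : i < l.length) :
    (l.set i (l.getD i 0 + 1)).sum = l.sum + 1 := by
  induction l generalizing i with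
  | nil => simp at hi
  | cons a t ih =>
    cases i with
    | zero => simp [List.getD]; ring
    | succ j =>
      simp only [List.set, List.sum_cons, List.getD_cons_succ]
      rw [ih j (by simpa using hi)]; ring

theorem pv_sumAt_set (ing : List (List Int)) (curr : List Int) (i x : Nat)
    (hlen : curr.length = ing.length) (hi : i < ing.length) :
    pvSumAt ing (curr.set i (curr.getD i 0 + 1)) x
      = pvSumAt ing curr x + (ing.getD i []).getD x 0 := by
  unfold pvSumAt
  have hb : ∀ (g : Nat → Int), ((List.range ing.length).map g).sum = ∑ j ∈ Finset.range ing.length, g j :=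
    fun g => rfl
  rw [hb, hb]
  have hic : i < curr.length := by omega
  have hstep : ∀ j ∈ Finset.range ing.length,
      (curr.set i (curr.getD i 0 + 1)).getD j 0 * (ing.getD j []).getD x 0
        = curr.getD j 0 * (ing.getD j []).getD x 0 + (if j = i then (ing.getD i []).getD x 0 else 0) := by
    intro j hj
    by_cases h : j = i
    · subst h
      rw [List.getD, List.getElem?_set_self hic]
      simp; ring
    · rw [List.getD, List.getElem?_set_ne (by omega)]
      simp [h, List.getD]
  rw [Finset.sum_congr rfl hstep, Finset.sum_add_distrib, Finset.sum_ite_eq' (Finset.range ing.length)]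
  simp [Finset.mem_range.mpr hi]

theorem pv_fold_lt (f : Nat → Int) (n : Nat) :
    ∀ (l : List Nat) (b : Nat), (∀ x ∈ l, x < n) → b < n →
      l.foldl (fun best x => if f x > f best then x else best) b < n := by
  intro l
  induction l with
  | nil => intro b _ hb; simpa using hb
  | cons a t ih =>
    intro b hl hb
    simp only [List.foldl_cons]
    split
    · exact ih _ (fun x hx => hl x (List.mem_cons_of_mem _ hx)) (hl a (List.mem_cons_self))
    · exact ih _ (fun x hx => hl x (List.mem_cons_of_mem _ hx)) hb

theorem pv_fold_congr (f g : Nat → Int) (n : Nat) (hfg : ∀ x, x < n → f x = g x) :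
    ∀ (l : List Nat) (b : Nat), (∀ x ∈ l, x < n) → b < n →
      l.foldl (fun best x => if f x > f best then x else best) b
        = l.foldl (fun best x => if g x > g best then x else best) b := by
  intro l
  induction l with
  | nil => intro b _ _; rfl
  | cons a t ih =>
    intro b hl hb
    have ha : a < n := hl a List.mem_cons_self
    simp only [List.foldl_cons, hfg a ha, hfg b hb]
    split <;> exact ih _ (fun x hx => hl x (List.mem_cons_of_mem _ hx)) (by assumption)

theorem pv_foldB_eq (f : Nat → Int) :
    ∀ (l : List Nat) (b : Nat),
      l.foldl (fun (st : Nat × Option Int) (i : Nat) =>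
          match st.2 with
          | none => (i, some (f i))
          | some bv => if f i > bv then (i, some (f i)) else st) (b, some (f b))
        = (l.foldl (fun best x => if f x > f best then x else best) b,
           some (f (l.foldl (fun best x => if f x > f best then x else best) b))) := by
  intro l
  induction l with
  | nil => intro b; rfl
  | cons a t ih =>
    intro b
    simp only [List.foldl_cons]
    by_cases h : f a > f b
    · simp only [if_pos h]; exact ih a
    · simp only [if_neg h]; exact ih b

theorem pv_bestIndex_eq (f : Nat → Int) (n : Nat) (hn : 0 < n) :
    ((List.range n).foldl (fun (st : Nat × Option Int) (i : Nat) =>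
        match st.2 with
        | none => (i, some (f i))
        | some bv => if f i > bv then (i, some (f i)) else st) ((0 : Nat), (none : Option Int))).1
      = (List.range n).foldl (fun best x => if f x > f best then x else best) 0 := by
  obtain ⟨m, rfl⟩ : ∃ m, n = m + 1 := ⟨n - 1, by omega⟩
  rw [List.range_eq_range', List.range'_succ]
  simp only [List.foldl_cons]
  rw [pv_foldB_eq]
  simp

theorem pv_cand_eq (ing : List (List Int)) (curr : List Int) (i : Nat)
    (hlen : curr.length = ing.length) (hi : i < ing.length) :
    pvGetScore ing (curr.set i (curr.getD i 0 + 1))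
      = pvCandScore ((ing.headD []).length - 1) (pvSumsOf ing curr) (ing.getD i []) := by
  unfold pvGetScore pvCandScore pvSumsOf
  refine congrArg List.prod (List.map_congr_left ?_)
  intro x hx
  rw [pv_getD_range_map _ _ (List.mem_range.mp hx), pv_sumAt_set ing curr i x hlen hi]

theorem pv_sums_update (ing : List (List Int)) (curr : List Int) (pick : Nat)
    (hlen : curr.length = ing.length) (hpick : pick < ing.length) :
    (List.range ((ing.headD []).length - 1)).map
        (fun x => (pvSumsOf ing curr).getD x 0 + (ing.getD pick []).getD x 0)
      = pvSumsOf ing (curr.set pick (curr.getD pick 0 + 1)) := by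
  unfold pvSumsOf
  refine List.map_congr_left ?_
  intro x hx
  rw [pv_getD_range_map _ _ (List.mem_range.mp hx), pv_sumAt_set ing curr pick x hlen hpick]

theorem pv_sums_init (ing : List (List Int)) :
    (List.range ((ing.headD []).length - 1)).map
        (fun x => (ing.map (fun row => row.getD x 0)).sum)
      = pvSumsOf ing (ing.map (fun _ => (1 : Int))) := by
  unfold pvSumsOf pvSumAt
  refine List.map_congr_left ?_
  intro x _
  have h1 : ∀ j ∈ List.range ing.length,
      (ing.map (fun _ => (1 : Int))).getD j 0 * (ing.getD j []).getD x 0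
        = (fun j => (fun r => r.getD x 0) (ing.getD j ([] : List Int))) j := by
    intro j hj
    have hj' : j < ing.length := List.mem_range.mp hj
    have hone : (ing.map (fun _ => (1 : Int))).getD j 0 = 1 := by
      simp [List.getD, hj']
    simp only [hone, one_mul]
  rw [show ing.length = (ing.map (fun _ => (1 : Int))).length from by simp] at h1 ⊢
  rw [List.map_congr_left h1]
  rw [show (ing.map (fun _ => (1 : Int))).length = ing.length from by simp]
  rw [pv_map_range_getD (fun r => r.getD x 0) ing ([] : List Int)]

theorem pv_pick_eq (ing : List (List Int)) (curr : List Int)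
    (hlen : curr.length = ing.length) (hn : 0 < ing.length) :
    pvPickMax ((List.range ing.length).map
        (fun i => pvGetScore ing (curr.set i (curr.getD i 0 + 1))))
        = pvBestIndex ing ((ing.headD []).length - 1) (pvSumsOf ing curr)
      ∧ pvPickMax ((List.range ing.length).map
        (fun i => pvGetScore ing (curr.set i (curr.getD i 0 + 1)))) < ing.length := by
  set fA := fun i => pvGetScore ing (curr.set i (curr.getD i 0 + 1)) with hfA
  set fB := fun i => pvCandScore ((ing.headD []).length - 1) (pvSumsOf ing curr) (ing.getD i []) with hfB
  have hmem : ∀ x ∈ List.range ing.length, x < ing.length := fun x hx => List.mem_range.mp hx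
  have step1 : pvPickMax ((List.range ing.length).map fA)
      = (List.range ing.length).foldl (fun best x => if fA x > fA best then x else best) 0 := by
    unfold pvPickMax
    rw [show ((List.range ing.length).map fA).length = ing.length from by simp]
    exact pv_fold_congr (fun x => ((List.range ing.length).map fA).getD x 0) fA ing.length
      (fun x hx => pv_getD_range_map fA 0 hx) (List.range ing.length) 0 hmem hn
  have hAB : ∀ x, x < ing.length → fA x = fB x := fun x hx => pv_cand_eq ing curr x hlen hx
  have step2 := pv_fold_congr fA fB ing.length hAB (List.range ing.length) 0 hmem hn
  have step3 : pvBestIndex ing ((ing.headD []).length - 1) (pvSumsOf ing curr)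
      = (List.range ing.length).foldl (fun best x => if fB x > fB best then x else best) 0 := by
    unfold pvBestIndex
    exact pv_bestIndex_eq fB ing.length hn
  refine ⟨by rw [step1, step2, step3], ?_⟩
  rw [step1]
  exact pv_fold_lt fA ing.length (List.range ing.length) 0 hmem hn

theorem pv_loop_eq (ing : List (List Int)) (total : Int) (hn : 0 < ing.length) :
    ∀ (fuel : Nat) (curr : List Int), curr.length = ing.length →
      total - curr.sum = (fuel : Int) →
      pvLoopB ing ((ing.headD []).length - 1) fuel (pvSumsOf ing curr)
        = pvSumsOf ing (pvLoopA ing total fuel curr) := by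
  intro fuel
  induction fuel with
  | zero => intro curr _ _; rfl
  | succ f ih =>
    intro curr hlen hfuel
    have hcond : curr.sum < total := by
      have : (0 : Int) < ((f + 1 : Nat) : Int) := by positivity
      omega
    obtain ⟨hpickeq, hpicklt⟩ := pv_pick_eq ing curr hlen hn
    rw [pvLoopA, if_pos hcond, pvLoopB]
    rw [← hpickeq, pv_sums_update ing curr _ hlen (hpickeq ▸ hpicklt)]
    refine ih _ (by simpa using hlen) ?_
    rw [pv_sum_set curr _ (by omega)]
    push_cast at hfuel ⊢
    omega

-- ===== VERDICT (by name: the statement is the Claim_ definition above) =====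
theorem find_dist_greedy_spec : Claim_equal_find_dist_greedy := by
  intro ing total _ hpre
  unfold Spec_find_dist_greedy find_dist_greedy find_dist_greedy_alt
  obtain ⟨hne, -⟩ := hpre
  have hn : 0 < ing.length := List.length_pos_iff.mpr hne
  have hlen0 : (ing.map (fun _ => (1 : Int))).length = ing.length := by simp
  have hsum0 : (ing.map (fun _ => (1 : Int))).sum = (ing.length : Int) := by
    rw [List.map_const']
    simp
  show pvGetScore ing (pvLoopA ing total
        (total - (ing.map (fun _ => (1 : Int))).sum).toNat (ing.map (fun _ => (1 : Int))))
      = ((pvLoopB ing ((ing.headD []).length - 1) (total - (ing.length : Int)).toNat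
          ((List.range ((ing.headD []).length - 1)).map
            (fun x => (ing.map (fun row => row.getD x 0)).sum))).map (fun s => max s 0)).prod
  rw [pv_sums_init ing]
  by_cases hc : total - (ing.length : Int) ≤ 0
  · have h0 : (total - (ing.map (fun _ => (1 : Int))).sum).toNat = 0 := by
      rw [hsum0]; omega
    have h0' : (total - (ing.length : Int)).toNat = 0 := by omega
    rw [hsum0] at h0 ⊢
    rw [h0']
    unfold pvGetScore pvSumsOf pvLoopB pvLoopA
    rw [List.map_map]
    rfl
  · have hfuel : total - (ing.map (fun _ => (1 : Int))).sum
        = (((total - (ing.length : Int)).toNat : Nat) : Int) := by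
      rw [hsum0]; omega
    rw [hsum0]
    rw [pv_loop_eq ing total hn _ _ hlen0 (by rw [hsum0]; omega)]
    unfold pvGetScore pvSumsOf
    rw [List.map_map]
    rfl
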